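-- pv_equiv track=rewrite | github.com/Tsundeer/MeowField_AutoPlay_Lite | apps/backend/src/mapping/notes.py | find_optimal_transpose
-- ===== SOURCE A (Python) =====
-- WHITE_PCS = {0, 2, 4, 5, 7, 9, 11}  # C D E F G A B
--
-- def calculate_white_key_ratio(notes: list[int], transpose: int = 0) -> float:
--     """
--     计算给定移调后的白键比例
--
--     参数:
--         notes: MIDI音符列表
--         transpose: 移调半音数
--
--     返回:
--         白键比例 (0.0 - 1.0)
--     """
--     if not notes:
--         return 0.0
--
--     white_count = 0
--     for note in notes:
--         transposed = note + transpose
--         pc = transposed % 12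
--         if pc in WHITE_PCS:
--             white_count += 1
--
--     return white_count / len(notes)
--
-- def find_optimal_transpose(notes: list[int], range_limit: int = 12) -> int:
--     """
--     找到使白键率最高的移调值
--
--     参数:
--         notes: MIDI音符列表
--         range_limit: 移调范围限制（默认±12半音）
--
--     返回:
--         最优移调半音数
--     """
--     if not notes:
--         return 0
--
--     best_transpose = 0
--     best_ratio = calculate_white_key_ratio(notes, 0)
--
--     for t in range(-range_limit, range_limit + 1):
--         ratio = calculate_white_key_ratio(notes, t)
--         if ratio > best_ratio:
--             best_ratio = ratio
--             best_transpose = t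
--
--     return best_transpose
-- ===== SOURCE B (Python) =====
-- WHITE_PCS = {0, 2, 4, 5, 7, 9, 11}
--
-- def find_optimal_transpose(notes: list[int], range_limit: int = 12) -> int:
--     if not notes:
--         return 0
--     # one pass: pitch-class histogram mod 12
--     hist = {}
--     for n in notes:
--         pc = n % 12
--         hist[pc] = hist.get(pc, 0) + 1
--
--     def white(t):
--         return sum(hist.get(pc, 0) for pc in range(12) if (pc + t) % 12 in WHITE_PCS)
--
--     best_t, best_w = 0, white(0)
--     for t in range(-range_limit, range_limit + 1):
--         w = white(t)
--         if w > best_w: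
--             best_t, best_w = t, w
--     return best_t
-- ===== Notes on version B (the rewrite author's own statement) =====
-- stated objective: faster
-- what changed: B precomputes a 12-bucket pitch-class histogram of the notes in one pass and evaluates each candidate transpose in O(12) from the histogram, instead of rescanning the whole note list for every transpose.
import Mathlib
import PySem

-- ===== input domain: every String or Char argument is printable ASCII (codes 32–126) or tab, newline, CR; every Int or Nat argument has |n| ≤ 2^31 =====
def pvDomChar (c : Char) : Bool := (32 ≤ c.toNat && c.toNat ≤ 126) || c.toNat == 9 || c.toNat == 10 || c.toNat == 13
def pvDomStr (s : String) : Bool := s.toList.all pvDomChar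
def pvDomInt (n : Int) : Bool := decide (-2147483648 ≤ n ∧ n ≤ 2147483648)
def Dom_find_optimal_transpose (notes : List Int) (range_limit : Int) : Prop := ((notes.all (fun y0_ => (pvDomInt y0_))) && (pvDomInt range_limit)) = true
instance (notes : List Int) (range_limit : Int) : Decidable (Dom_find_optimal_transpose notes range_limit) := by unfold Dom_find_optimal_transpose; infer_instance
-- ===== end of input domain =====

-- B replaces A's rescan of the whole note list for every transpose by a single mod-12
-- pitch-class histogram pass plus an O(12) evaluation per transpose (objective: faster).
-- Python's float ratios white/len(notes) always share the positive denominator len(notes),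
-- so 'ratio > best_ratio' holds iff the integer numerators compare so (IEEE division is
-- correctly rounded, hence strictly monotone in the numerator at these magnitudes);
-- both ports therefore carry the white-key COUNT instead of the float ratio.

-- ===== PORT A =====
-- WHITE_PCS = {0, 2, 4, 5, 7, 9, 11}
def pvIsWhite (pc : Int) : Bool :=
  pc == 0 || pc == 2 || pc == 4 || pc == 5 || pc == 7 || pc == 9 || pc == 11

-- calculate_white_key_ratio, carried as its integer numerator white_count (see header note)
def calculate_white_key_count (notes : List Int) (transpose : Int) : Int :=
  notes.foldl (fun white_count note =>
    if pvIsWhite (PySem.Int.mod (note + transpose) 12) then white_count + 1 else white_count) 0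

def find_optimal_transpose (notes : List Int) (range_limit : Int) : Int :=
  if notes = [] then 0
  else
    let init : Int × Int := (0, calculate_white_key_count notes 0)
    ((PySem.List.pyRange (-range_limit) (range_limit + 1) 1).foldl
      (fun best t =>
        let ratio := calculate_white_key_count notes t
        if best.2 < ratio then (t, ratio) else best) init).1

-- ===== PORT B =====
-- hist = {}; for n in notes: pc = n % 12; hist[pc] = hist.get(pc, 0) + 1
def pvHist (notes : List Int) : PySem.Dict Int Int :=
  notes.foldl (fun hist n =>
    let pc := PySem.Int.mod n 12
    hist.insert pc (hist.getD pc 0 + 1)) PySem.Dict.empty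

-- white(t) = sum(hist.get(pc, 0) for pc in range(12) if (pc + t) % 12 in WHITE_PCS)
def pvWhiteOf (hist : PySem.Dict Int Int) (t : Int) : Int :=
  (PySem.List.pyRange 0 12 1).foldl
    (fun s pc => if pvIsWhite (PySem.Int.mod (pc + t) 12) then s + hist.getD pc 0 else s) 0

def find_optimal_transpose_alt (notes : List Int) (range_limit : Int) : Int :=
  if notes = [] then 0
  else
    let hist := pvHist notes
    ((PySem.List.pyRange (-range_limit) (range_limit + 1) 1).foldl
      (fun best t =>
        let w := pvWhiteOf hist t
        if best.2 < w then (t, w) else best) (0, pvWhiteOf hist 0)).1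

-- ===== PRECONDITION & SPEC =====
def Spec_find_optimal_transpose (notes : List Int) (range_limit : Int) (out : Int) : Prop := out = find_optimal_transpose_alt notes range_limit
instance (notes : List Int) (range_limit : Int) (out : Int) : Decidable (Spec_find_optimal_transpose notes range_limit out) := by unfold Spec_find_optimal_transpose; infer_instance

-- ===== CLAIM (what is proved, stated in full; the proofs are below) =====
def Claim_equal_find_optimal_transpose : Prop := ∀ (notes : List Int) (range_limit : Int), Dom_find_optimal_transpose notes range_limit → Spec_find_optimal_transpose notes range_limit (find_optimal_transpose notes range_limit)

-- ===== LEMMAS AND PROOFS =====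

-- the histogram lookup is the count of the pitch class among the notes
theorem pvHist_getD (notes : List Int) (pc : Int) :
    (pvHist notes).getD pc 0 = ((notes.map (fun n => PySem.Int.mod n 12)).count pc : Int) := by
  have h : pvHist notes = (notes.map (fun n => PySem.Int.mod n 12)).foldl
      (fun (d : PySem.Dict Int Int) x => d.insert x (d.getD x 0 + 1)) PySem.Dict.empty := by
    rw [List.foldl_map]
    rfl
  rw [h, PySem.Dict.getD_foldl_insert_add_one]
  simp [PySem.Dict.empty, PySem.Dict.getD, PySem.Dict.get?]

-- the 12-term sum of a delta at pa ∈ [0, 12) picks out the term at pa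
theorem pv_delta_sum (f : Int → Bool) (pa : Int) (h0 : 0 ≤ pa) (h1 : pa < 12) :
    ((PySem.List.pyRange 0 12 1).map
      (fun pc => if f pc then (if pc == pa then (1 : Int) else 0) else 0)).sum
      = if f pa then 1 else 0 := by
  have hr : PySem.List.pyRange 0 12 1 = [0,1,2,3,4,5,6,7,8,9,10,11] := by decide
  rw [hr]
  interval_cases pa <;> simp

-- the per-transpose white-key count of the notes, expressed through the mod-12 counts
theorem pv_countP_eq (t : Int) (l : List Int) :
    ((l.countP (fun note => pvIsWhite (PySem.Int.mod (note + t) 12)) : Nat) : Int)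
      = ((PySem.List.pyRange 0 12 1).map
          (fun pc => if pvIsWhite (PySem.Int.mod (pc + t) 12)
            then ((l.map (fun n => PySem.Int.mod n 12)).count pc : Int) else 0)).sum := by
  have hmod : ∀ x : Int, PySem.Int.mod x 12 = x % 12 :=
    fun _ => PySem.Int.mod_eq_emod_of_pos (by norm_num)
  induction l with
  | nil => simp
  | cons a l ih =>
    have hcount : ∀ pc : Int,
        (((a :: l).map (fun n => PySem.Int.mod n 12)).count pc : Int)
          = ((l.map (fun n => PySem.Int.mod n 12)).count pc : Int)
            + (if pc == PySem.Int.mod a 12 then 1 else 0) := by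
      intro pc
      simp only [List.map_cons, List.count_cons]
      by_cases hpc : pc = PySem.Int.mod a 12
      · subst hpc; simp
      · rw [hmod] at hpc
        simp [hpc, Ne.symm hpc]
    simp only [hcount]
    have hsplit : ((PySem.List.pyRange 0 12 1).map
        (fun pc => if pvIsWhite (PySem.Int.mod (pc + t) 12)
          then ((l.map (fun n => PySem.Int.mod n 12)).count pc : Int)
            + (if pc == PySem.Int.mod a 12 then 1 else 0) else 0)).sum
        = ((PySem.List.pyRange 0 12 1).map
            (fun pc => if pvIsWhite (PySem.Int.mod (pc + t) 12)
              then ((l.map (fun n => PySem.Int.mod n 12)).count pc : Int) else 0)).sum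
          + ((PySem.List.pyRange 0 12 1).map
            (fun pc => if pvIsWhite (PySem.Int.mod (pc + t) 12)
              then (if pc == PySem.Int.mod a 12 then (1 : Int) else 0) else 0)).sum := by
      rw [← PySem.List.sum_map_add_int]
      apply congrArg List.sum
      apply List.map_congr_left
      intro pc _
      split <;> simp
    rw [hsplit,
      pv_delta_sum (fun pc => pvIsWhite (PySem.Int.mod (pc + t) 12))
        (PySem.Int.mod a 12) (by rw [hmod]; omega) (by rw [hmod]; omega)]
    have harg : PySem.Int.mod (PySem.Int.mod a 12 + t) 12 = PySem.Int.mod (a + t) 12 := by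
      simp only [hmod]; omega
    rw [harg, List.countP_cons, ← ih]
    push_cast
    split <;> ring

-- A's per-transpose white count equals B's histogram evaluation
theorem pv_white_eq (notes : List Int) (t : Int) :
    calculate_white_key_count notes t = pvWhiteOf (pvHist notes) t := by
  unfold calculate_white_key_count pvWhiteOf
  rw [PySem.List.foldl_if_add_one]
  have hbody : (fun (s pc : Int) =>
      if pvIsWhite (PySem.Int.mod (pc + t) 12) then s + (pvHist notes).getD pc 0 else s)
      = (fun s pc => s + (if pvIsWhite (PySem.Int.mod (pc + t) 12)
          then ((notes.map (fun n => PySem.Int.mod n 12)).count pc : Int) else 0)) := by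
    funext s pc
    rw [pvHist_getD]
    split <;> simp
  rw [hbody, PySem.List.foldl_add]
  simp only [zero_add]
  exact pv_countP_eq t notes

-- ===== VERDICT (by name: the statement is the Claim_ definition above) =====
theorem find_optimal_transpose_spec : Claim_equal_find_optimal_transpose := by
  intro notes range_limit _
  unfold Spec_find_optimal_transpose find_optimal_transpose find_optimal_transpose_alt
  by_cases h : notes = []
  · simp [h]
  · simp only [h, if_false]
    simp only [pv_white_eq]
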